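-- pv_equiv track=rewrite | github.com/ChanghyunRyu/Python-CodingTest-note | samsaug_SW/2d_arr_calc/2d_arr_calc.py | calc_arr
-- ===== SOURCE A (Python) =====
-- def calc_arr(array):
--     max_len = 0
--     if len(array) >= len(array[0]):
--         result = []
--         for i in range(len(array)):
--             count_number = {}
--             for j in range(len(array[i])):
--                 if array[i][j] == 0:
--                     continue
--                 if array[i][j] in count_number:
--                     count_number[array[i][j]] += 1
--                 else:
--                     count_number[array[i][j]] = 1
--             temp = []
--             for number in count_number:
--                 temp.append([number, count_number[number]])
--             temp.sort(key=lambda x: (x[1], x[0]))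
--             line = []
--             for t in temp:
--                 line += t
--             max_len = max(max_len, len(line))
--             result.append(line)
--         for i in range(len(result)):
--             for _ in range(max_len-len(result[i])):
--                 result[i].append(0)
--     else:
--         data = []
--         for j in range(len(array[0])):
--             count_number = {}
--             for i in range(len(array)):
--                 if array[i][j] == 0:
--                     continue
--                 if array[i][j] in count_number:
--                     count_number[array[i][j]] += 1
--                 else:
--                     count_number[array[i][j]] = 1
--             temp = []
--             for number in count_number:
--                 temp.append([number, count_number[number]])
--             temp.sort(key=lambda x: (x[1], x[0]))
--             line = []
--             for t in temp:
--                 line += t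
--             max_len = max(max_len, len(line))
--             data.append(line)
--         result = [[0]*(len(array[0])) for _ in range(max_len)]
--         for i in range(len(data)):
--             for j in range(len(data[i])):
--                 result[j][i] = data[i][j]
--     return result
-- ===== SOURCE B (Python) =====
-- def calc_arr(array):
--     def process(line):
--         # run-length-encode the sorted nonzero values, then a stable sort by
--         # run length alone: ties keep the ascending value order, giving
--         # (count, value) order without ever counting or hashing.
--         runs = []
--         for v in sorted(x for x in line if x != 0):
--             if runs and runs[-1][0] == v:
--                 runs[-1][1] += 1
--             else:
--                 runs.append([v, 1])
--         runs.sort(key=lambda r: r[1])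
--         out = []
--         for r in runs:
--             out += r
--         return out
--
--     row_mode = len(array) >= len(array[0])
--     if row_mode:
--         lines = array
--     else:
--         lines = [[row[j] for row in array] for j in range(len(array[0]))]
--     proc = [process(l) for l in lines]
--     max_len = max((len(p) for p in proc), default=0)
--     if row_mode:
--         return [p + [0] * (max_len - len(p)) for p in proc]
--     return [[p[j] if j < len(p) else 0 for p in proc] for j in range(max_len)]
-- ===== Notes on version B (the rewrite author's own statement) =====
-- stated objective: alternative
-- what changed: Per line, A counts nonzero frequencies in a dict and sorts the items by the tuple key (count, value); B never counts: it sorts the nonzero values, run-length-encodes them in one linear scan, and then relies on sort stability, sorting the runs by length alone so ties keep the ascending value order; the column-mode transpose/pad is done by direct comprehensions instead of A's pre-allocated zero matrix and index scatter.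
import Mathlib
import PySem

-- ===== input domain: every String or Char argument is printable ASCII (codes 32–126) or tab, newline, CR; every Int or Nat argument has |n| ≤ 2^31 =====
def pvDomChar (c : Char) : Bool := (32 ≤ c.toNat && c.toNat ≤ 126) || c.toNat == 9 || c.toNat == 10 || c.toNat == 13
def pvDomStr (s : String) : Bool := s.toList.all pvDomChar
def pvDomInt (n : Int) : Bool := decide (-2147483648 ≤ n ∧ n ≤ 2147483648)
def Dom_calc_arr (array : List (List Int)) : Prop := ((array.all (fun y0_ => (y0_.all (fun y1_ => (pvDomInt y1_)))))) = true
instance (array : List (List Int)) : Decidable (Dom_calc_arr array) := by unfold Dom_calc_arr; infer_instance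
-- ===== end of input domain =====

-- B never counts frequencies: it sorts each line's nonzero values, run-length-encodes them in one
-- scan, and stable-sorts the runs by length alone (ties keep value order); transpose/pad by
-- comprehensions instead of A's dict counting and zero-matrix index scatter. Alternative, same cost.

-- ===== PORT A =====
-- A's per-line block: count nonzero frequencies in a dict, list the items, sort by (count, value), flatten
def calcArrLineA (line : List Int) : List Int :=
  let d : PySem.Dict Int Int := line.foldl (fun d v =>
      if v = 0 then d
      else if d.contains v then d.insert v (d.getD v 0 + 1) else d.insert v 1)
    PySem.Dict.empty
  let temp : List (Int × Int) := PySem.List.sorted2 d.items (fun t => t.2) (fun t => t.1)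
  temp.foldl (fun acc t => acc ++ [t.1, t.2]) []

def calc_arr (array : List (List Int)) : List (List Int) :=
  if (array.length : Int) ≥ ((array.headI).length : Int) then
    -- row mode: accumulate (max_len, result) over the rows, then pad each row in place
    let s := array.foldl (fun (s : Int × List (List Int)) row =>
        let line := calcArrLineA row
        (max s.1 (line.length : Int), s.2 ++ [line])) ((0 : Int), ([] : List (List Int)))
    (PySem.List.pyRange 0 (s.2.length : Int)).foldl (fun r i =>
        PySem.List.pySetD r i (PySem.List.pyGetD r i [] ++
          List.replicate (s.1 - ((PySem.List.pyGetD r i []).length : Int)).toNat 0)) s.2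
  else
    -- column mode: accumulate (max_len, data) over the columns, then scatter into a zero matrix
    let s := (PySem.List.pyRange 0 ((array.headI).length : Int)).foldl
        (fun (s : Int × List (List Int)) j =>
          let col := array.map (fun row => PySem.List.pyGetD row j 0)
          let line := calcArrLineA col
          (max s.1 (line.length : Int), s.2 ++ [line])) ((0 : Int), ([] : List (List Int)))
    let result := List.replicate s.1.toNat (List.replicate (array.headI).length (0 : Int))
    (PySem.List.pyRange 0 (s.2.length : Int)).foldl (fun res i =>
      let di := PySem.List.pyGetD s.2 i []
      (PySem.List.pyRange 0 (di.length : Int)).foldl (fun res j =>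
        PySem.List.pySetD res j
          (PySem.List.pySetD (PySem.List.pyGetD res j []) i (PySem.List.pyGetD di j 0))) res) result

-- ===== PORT B =====
-- B's run-length encoding: one scan over an already-sorted list, growing the last run or opening a new one
def calcArrRle (s : List Int) : List (Int × Int) :=
  s.foldl (fun rs v =>
    match rs.getLast? with
    | some r => if r.1 = v then rs.dropLast ++ [(r.1, r.2 + 1)] else rs ++ [(v, 1)]
    | none => [(v, 1)]) []

-- B's per-line helper: sort the nonzeros, run-length-encode, stable-sort runs by length, flatten
def calcArrLineB (line : List Int) : List Int :=
  let runs := calcArrRle (PySem.List.sorted (line.filter (fun v => decide (v ≠ 0))) (fun v => v))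
  let runs2 := PySem.List.sorted runs (fun r => r.2)
  runs2.foldl (fun acc r => acc ++ [r.1, r.2]) []

def calc_arr_alt (array : List (List Int)) : List (List Int) :=
  let rowMode : Bool := decide ((array.length : Int) ≥ ((array.headI).length : Int))
  let lines := if rowMode then array
    else (PySem.List.pyRange 0 ((array.headI).length : Int)).map
      (fun j => array.map (fun row => PySem.List.pyGetD row j 0))
  let proc := lines.map calcArrLineB
  let maxLen := PySem.List.maxD (proc.map (fun p => (p.length : Int))) (fun x => x) 0
  if rowMode then
    proc.map (fun p => p ++ List.replicate (maxLen - (p.length : Int)).toNat 0)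
  else
    (PySem.List.pyRange 0 maxLen).map (fun j =>
      proc.map (fun p => if j < (p.length : Int) then PySem.List.pyGetD p j 0 else 0))

-- ===== PRECONDITION & SPEC =====
-- Pre_ excludes exactly the inputs where A raises IndexError: the empty array (len(array[0])) and
-- column mode (len(array) < len(array[0])) with some row shorter than array[0] (the access array[i][j]).
def Pre_calc_arr (array : List (List Int)) : Prop :=
  array ≠ [] ∧ ((array.headI).length ≤ array.length ∨ ∀ l ∈ array, (array.headI).length ≤ l.length)
instance (array : List (List Int)) : Decidable (Pre_calc_arr array) := by unfold Pre_calc_arr; infer_instance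

def pvWitness_calc_arr : List (List Int) := [[1, 2, 1], [0, 2, 5]]

def Spec_calc_arr (array : List (List Int)) (out : List (List Int)) : Prop := out = calc_arr_alt array
instance (array : List (List Int)) (out : List (List Int)) : Decidable (Spec_calc_arr array out) := by unfold Spec_calc_arr; infer_instance

-- ===== CLAIM (what is proved, stated in full; the proofs are below) =====
def Claim_equal_calc_arr : Prop := ∀ (array : List (List Int)), Dom_calc_arr array → Pre_calc_arr array → Spec_calc_arr array (calc_arr array)

-- ===== LEMMAS AND PROOFS =====

-- the two comparators: B's plain count key, and A's (count, value) tuple key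
def calcArrCb1 (a b : Int × Int) : Bool := decide (a.2 < b.2)
def calcArrCb2 (a b : Int × Int) : Bool :=
  decide (a.2 < b.2) || (!decide (b.2 < a.2) && decide (a.1 < b.1))

theorem calcArrCb2_trans {a b c : Int × Int} (h1 : calcArrCb2 a b = true)
    (h2 : calcArrCb2 b c = true) : calcArrCb2 a c = true := by
  simp only [calcArrCb2, Bool.or_eq_true, Bool.and_eq_true, Bool.not_eq_true',
    decide_eq_true_eq, decide_eq_false_iff_not] at *
  omega

theorem calcArrCb2_asymm {a b : Int × Int} (h : calcArrCb2 a b = true) :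
    calcArrCb2 b a = false := by
  simp only [calcArrCb2, Bool.or_eq_true, Bool.and_eq_true, Bool.not_eq_true',
    decide_eq_true_eq, decide_eq_false_iff_not, Bool.or_eq_false_iff, Bool.and_eq_false_iff,
    Bool.not_eq_false'] at *
  omega

theorem calcArrCb2_total_of_ne {a b : Int × Int} (hne : a.1 ≠ b.1)
    (h : calcArrCb2 b a = false) : calcArrCb2 a b = true := by
  simp only [calcArrCb2, Bool.or_eq_true, Bool.and_eq_true, Bool.not_eq_true',
    decide_eq_true_eq, decide_eq_false_iff_not, Bool.or_eq_false_iff, Bool.and_eq_false_iff,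
    Bool.not_eq_false'] at *
  omega

theorem calcArrCb1_eq_cb2 {x y : Int × Int} (h : y.1 < x.1) :
    calcArrCb1 x y = calcArrCb2 x y := by
  simp only [calcArrCb1, calcArrCb2]
  have : decide (x.1 < y.1) = false := by simp; omega
  simp [this]

-- inserting with two comparators that agree on the existing elements gives the same list
theorem calcArr_insertBy_congr {α : Type} (b1 b2 : α → α → Bool) (x : α) :
    ∀ (acc : List α), (∀ y ∈ acc, b1 x y = b2 x y) →
    PySem.List.insertBy b1 x acc = PySem.List.insertBy b2 x acc := by
  intro acc
  induction acc with
  | nil => intro _; rfl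
  | cons y ys ih =>
      intro h
      have hy : b1 x y = b2 x y := h y (by simp)
      simp only [PySem.List.insertBy, hy]
      by_cases hb : b2 x y = true
      · simp [hb]
      · simp only [hb, Bool.false_eq_true, if_false]
        rw [ih (fun z hz => h z (by simp [hz]))]

-- stability: on a list whose first components strictly increase, sorting by the count key alone
-- equals sorting by the (count, value) tuple key — the fold-level statement
theorem calcArr_stab_fold :
    ∀ (l acc : List (Int × Int)), (∀ x ∈ l, ∀ y ∈ acc, y.1 < x.1) →
    l.Pairwise (fun a b => a.1 < b.1) →
    l.foldl (fun acc x => PySem.List.insertBy calcArrCb1 x acc) acc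
      = l.foldl (fun acc x => PySem.List.insertBy calcArrCb2 x acc) acc := by
  intro l
  induction l with
  | nil => intro acc _ _; rfl
  | cons x xs ih =>
      intro acc hlt hpw
      simp only [List.foldl_cons]
      rw [calcArr_insertBy_congr calcArrCb1 calcArrCb2 x acc
        (fun y hy => calcArrCb1_eq_cb2 (hlt x (by simp) y hy))]
      apply ih
      · intro z hz y hy
        rcases (PySem.List.mem_insertBy _ _ _ _).mp hy with h | h
        · subst h; exact (List.pairwise_cons.mp hpw).1 z hz
        · exact hlt z (by simp [hz]) y h
      · exact (List.pairwise_cons.mp hpw).2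

-- inserting into a cb2-ordered list keeps it cb2-ordered
theorem calcArr_insertBy_pairwise (x : Int × Int) :
    ∀ (acc : List (Int × Int)), acc.Pairwise (fun a b => calcArrCb2 b a = false) →
    (PySem.List.insertBy calcArrCb2 x acc).Pairwise (fun a b => calcArrCb2 b a = false) := by
  intro acc
  induction acc with
  | nil => intro _; simp [PySem.List.insertBy]
  | cons y ys ih =>
      intro hpw
      obtain ⟨hy, hys⟩ := List.pairwise_cons.mp hpw
      simp only [PySem.List.insertBy]
      by_cases hb : calcArrCb2 x y = true
      · simp only [hb, if_true]
        refine List.pairwise_cons.mpr ⟨?_, hpw⟩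
        intro z hz
        rcases List.mem_cons.mp hz with h | h
        · subst h; exact calcArrCb2_asymm hb
        · -- z ∈ ys: cb2 z y = false and cb2 x y = true force cb2 z x = false
          by_contra hzx
          have hzx' : calcArrCb2 z x = true := by
            cases hcase : calcArrCb2 z x
            · exact absurd hcase hzx
            · rfl
          have : calcArrCb2 z y = true := calcArrCb2_trans hzx' hb
          rw [hy z h] at this
          exact Bool.false_ne_true this
      · have hb' : calcArrCb2 x y = false := by
          cases hcase : calcArrCb2 x y
          · rfl
          · exact absurd hcase hb
        simp only [hb, Bool.false_eq_true, if_false]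
        refine List.pairwise_cons.mpr ⟨?_, ih hys⟩
        intro z hz
        rcases (PySem.List.mem_insertBy _ _ _ _).mp hz with h | h
        · subst h; exact hb'
        · exact hy z h

theorem calcArr_fold_pairwise :
    ∀ (l acc : List (Int × Int)), acc.Pairwise (fun a b => calcArrCb2 b a = false) →
    (l.foldl (fun acc x => PySem.List.insertBy calcArrCb2 x acc) acc).Pairwise
      (fun a b => calcArrCb2 b a = false) := by
  intro l
  induction l with
  | nil => intro acc h; exact h
  | cons x xs ih => intro acc h; exact ih _ (calcArr_insertBy_pairwise x acc h)

-- two strictly cb2-ordered rearrangements of the same elements are equal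
theorem calcArr_sorted_unique :
    ∀ (l1 l2 : List (Int × Int)), l1.Perm l2 →
    l1.Pairwise (fun a b => calcArrCb2 a b = true) →
    l2.Pairwise (fun a b => calcArrCb2 a b = true) → l1 = l2 := by
  intro l1
  induction l1 with
  | nil => intro l2 hp _ _; exact (hp.nil_eq).symm ▸ rfl
  | cons a t1 ih =>
      intro l2 hp h1 h2
      cases l2 with
      | nil => exact absurd hp.symm (by simp)
      | cons b t2 =>
          obtain ⟨ha1, h1'⟩ := List.pairwise_cons.mp h1
          obtain ⟨hb2, h2'⟩ := List.pairwise_cons.mp h2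
          have hab : a = b := by
            by_contra hne
            have hamem : a ∈ b :: t2 := hp.mem_iff.mp (by simp)
            have hbmem : b ∈ a :: t1 := hp.symm.mem_iff.mp (by simp)
            have ha2 : a ∈ t2 := by
              rcases List.mem_cons.mp hamem with h | h
              · exact absurd h hne
              · exact h
            have hb1 : b ∈ t1 := by
              rcases List.mem_cons.mp hbmem with h | h
              · exact absurd h.symm hne
              · exact h
            have h1ab : calcArrCb2 a b = true := ha1 b hb1
            have h2ba : calcArrCb2 b a = true := hb2 a ha2
            rw [calcArrCb2_asymm h1ab] at h2ba
            exact Bool.false_ne_true h2ba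
          subst hab
          rw [ih t2 (hp.cons_inv) h1' h2']

-- sorted2 with keys (.2, .1), as a fold (definitional)
theorem calcArr_sorted2_eq_fold (l : List (Int × Int)) :
    PySem.List.sorted2 l (fun t => t.2) (fun t => t.1)
      = l.foldl (fun acc x => PySem.List.insertBy calcArrCb2 x acc) [] := rfl

-- sorted2 over any rearrangement with pairwise-distinct first components is the same list
theorem calcArr_sorted2_perm_congr (l1 l2 : List (Int × Int)) (hp : l1.Perm l2)
    (hne : l1.Pairwise (fun a b => a.1 ≠ b.1)) :
    PySem.List.sorted2 l1 (fun t => t.2) (fun t => t.1)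
      = PySem.List.sorted2 l2 (fun t => t.2) (fun t => t.1) := by
  have hsym : ∀ {a b : Int × Int}, a.1 ≠ b.1 → b.1 ≠ a.1 := fun h => h.symm
  have hne2 : l2.Pairwise (fun a b => a.1 ≠ b.1) := (hp.pairwise_iff hsym).mp hne
  have strict : ∀ (l : List (Int × Int)), l.Pairwise (fun a b => a.1 ≠ b.1) →
      (PySem.List.sorted2 l (fun t => t.2) (fun t => t.1)).Pairwise
        (fun a b => calcArrCb2 a b = true) := by
    intro l hl
    have hperm : (PySem.List.sorted2 l (fun t => t.2) (fun t => t.1)).Perm l :=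
      PySem.List.sorted2_perm _ _ _ _
    have hne' : (PySem.List.sorted2 l (fun t => t.2) (fun t => t.1)).Pairwise
        (fun a b => a.1 ≠ b.1) := (hperm.pairwise_iff hsym).mpr hl
    have hord : (PySem.List.sorted2 l (fun t => t.2) (fun t => t.1)).Pairwise
        (fun a b => calcArrCb2 b a = false) := by
      rw [calcArr_sorted2_eq_fold]
      exact calcArr_fold_pairwise l [] (by simp)
    exact (hord.and hne').imp (fun h => calcArrCb2_total_of_ne h.2 h.1)
  have hperm12 : (PySem.List.sorted2 l1 (fun t => t.2) (fun t => t.1)).Perm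
      (PySem.List.sorted2 l2 (fun t => t.2) (fun t => t.1)) :=
    ((PySem.List.sorted2_perm _ _ _ _).trans hp).trans (PySem.List.sorted2_perm _ _ _ _).symm
  exact calcArr_sorted_unique _ _ hperm12 (strict l1 hne) (strict l2 hne2)

-- set(s) of a ≤-sorted list is strictly increasing
theorem calcArr_ofList_lt :
    ∀ (s : List Int), s.Pairwise (· ≤ ·) → (PySem.Set.ofList s).Pairwise (· < ·) := by
  intro s
  induction s using List.reverseRecOn with
  | nil => intro _; simp [PySem.Set.ofList]
  | append_singleton s v ih =>
      intro h
      obtain ⟨hs, _, hle⟩ := List.pairwise_append.mp h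
      rw [PySem.Set.ofList_append_singleton]
      by_cases hv : v ∈ PySem.Set.ofList s
      · rw [PySem.Set.add_of_mem hv]; exact ih hs
      · rw [PySem.Set.add_of_not_mem hv]
        refine List.pairwise_append.mpr ⟨ih hs, by simp, ?_⟩
        intro x hx y hy
        have hxs : x ∈ s := (PySem.Set.mem_ofList _ _).mp hx
        have hxv : x ≤ v := hle x hxs v (by simp)
        have hxne : x ≠ v := by
          intro he; subst he; exact hv hx
        simp at hy
        subst hy
        omega

-- run-length encoding of a ≤-sorted list: one pair (v, multiplicity) per distinct value, in order
theorem calcArr_rle_eq :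
    ∀ (s : List Int), s.Pairwise (· ≤ ·) →
    calcArrRle s = (PySem.Set.ofList s).map (fun v => (v, ((s.count v : Nat) : Int))) := by
  intro s
  induction s using List.reverseRecOn with
  | nil => intro _; simp [calcArrRle, PySem.Set.ofList]
  | append_singleton s v ih =>
      intro h
      obtain ⟨hs, _, hle'⟩ := List.pairwise_append.mp h
      have hle : ∀ x ∈ s, x ≤ v := fun x hx => hle' x hx v (by simp)
      have hstep : calcArrRle (s ++ [v]) =
          (match (calcArrRle s).getLast? with
            | some r => if r.1 = v then (calcArrRle s).dropLast ++ [(r.1, r.2 + 1)]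
                        else calcArrRle s ++ [(v, 1)]
            | none => [(v, 1)]) := by
        simp [calcArrRle, List.foldl_append]
      rw [hstep, ih hs]
      rcases List.eq_nil_or_concat (PySem.Set.ofList s) with hnil | ⟨E, w, hEw⟩
      · -- s = []
        have hsnil : s = [] := by
          by_contra hne
          obtain ⟨x, hx⟩ := List.exists_mem_of_ne_nil s (by exact hne)
          have : x ∈ PySem.Set.ofList s := (PySem.Set.mem_ofList _ _).mpr hx
          rw [hnil] at this
          exact absurd this (by simp)
        subst hsnil
        simp [PySem.Set.ofList]
      · rw [List.concat_eq_append] at hEw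
        have hDlt := calcArr_ofList_lt s hs
        have hwmem : w ∈ s := (PySem.Set.mem_ofList _ _).mp (by rw [hEw]; simp)
        have hElt : ∀ x ∈ E, x < w := by
          rw [hEw] at hDlt
          obtain ⟨_, _, hx⟩ := List.pairwise_append.mp hDlt
          exact fun x hx' => hx x hx' w (by simp)
        rw [hEw]
        have hlast : ((E ++ [w]).map (fun v => (v, ((s.count v : Nat) : Int)))).getLast?
            = some (w, ((s.count w : Nat) : Int)) := by
          simp
        rw [hlast]
        simp only []
        by_cases hwv : w = v
        · -- the last value recurs: the set is unchanged, only its count grows by one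
          subst hwv
          rw [if_pos rfl]
          rw [PySem.Set.ofList_append_singleton, hEw,
            PySem.Set.add_of_mem (by simp)]
          have hdrop : ((E ++ [w]).map (fun u => (u, ((s.count u : Nat) : Int)))).dropLast
              = E.map (fun u => (u, ((s.count u : Nat) : Int))) := by
            simp
          rw [hdrop]
          simp only [List.map_append, List.map_cons, List.map_nil]
          congr 1
          · apply List.map_congr_left
            intro u hu
            have hne : u ≠ w := by have := hElt u hu; omega
            have hc : List.count u [w] = 0 :=
              List.count_eq_zero_of_not_mem (by simp [hne])
            simp [List.count_append, hc]
          · simp [List.count_append]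
        · -- v is new: a fresh run [(v, 1)] is appended
          rw [if_neg (by simpa using hwv)]
          have hvnot : v ∉ s := by
            intro hv
            have hvD : v ∈ PySem.Set.ofList s := (PySem.Set.mem_ofList _ _).mpr hv
            rw [hEw] at hvD
            rcases List.mem_append.mp hvD with h | h
            · have h1 := hElt v h
              have h2 := hle w hwmem
              omega
            · simp at h
              exact hwv h.symm
          rw [PySem.Set.ofList_append_singleton, hEw,
            PySem.Set.add_of_not_mem (by rw [← hEw]; exact fun hc => hvnot ((PySem.Set.mem_ofList _ _).mp hc))]
          rw [← hEw]
          simp only [List.map_append, List.map_cons, List.map_nil]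
          congr 1
          · apply List.map_congr_left
            intro u hu
            have hus : u ∈ s := (PySem.Set.mem_ofList _ _).mp hu
            have hne : u ≠ v := fun he => hvnot (he ▸ hus)
            have hc : List.count u [v] = 0 :=
              List.count_eq_zero_of_not_mem (by simp [hne])
            simp [List.count_append, hc]
          · simp [List.count_append, List.count_eq_zero_of_not_mem hvnot]

-- the per-line block of A and the per-line helper of B agree
theorem calcArrLine_eq (line : List Int) : calcArrLineA line = calcArrLineB line := by
  set vals := line.filter (fun v => decide (v ≠ 0)) with hvals
  -- A's dict fold is Counter(vals); its items are the distinct values with their counts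
  have ha : calcArrLineA line =
      (PySem.List.sorted2
        ((PySem.Set.ofList vals).map (fun k => (k, ((vals.count k : Nat) : Int))))
        (fun t => t.2) (fun t => t.1)).foldl (fun acc t => acc ++ [t.1, t.2]) [] := by
    have h1 : (line.foldl (fun d v => if v = 0 then d
          else if d.contains v then d.insert v (d.getD v 0 + 1) else d.insert v 1) PySem.Dict.empty)
        = PySem.Dict.counter vals := by
      rw [PySem.List.foldl_congr_mem line _
          (fun d v => if v ≠ 0 then (if d.contains v then d.insert v (d.getD v 0 + 1) else d.insert v 1) else d) _
          (by intro d v _; by_cases hv : v = 0 <;> simp [hv])]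
      rw [PySem.List.foldl_ite_eq_foldl_filter]
      rw [PySem.List.foldl_congr_mem _ _ (fun d v => d.insert v (d.getD v 0 + 1)) _ ?_]
      · exact PySem.Dict.foldl_insert_getD_add_one_eq_counter _
      · intro d v _
        by_cases hc : d.contains v = true
        · simp [hc]
        · have h0 : d.getD v 0 = 0 :=
            PySem.Dict.getD_of_not_contains d 0 (by simpa using hc)
          simp [hc, h0]
    show (PySem.List.sorted2
        (line.foldl (fun d v => if v = 0 then d
          else if d.contains v then d.insert v (d.getD v 0 + 1) else d.insert v 1)
          PySem.Dict.empty).items (fun t => t.2) (fun t => t.1)).foldl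
        (fun acc t => acc ++ [t.1, t.2]) [] = _
    rw [h1, PySem.Dict.items_counter]
  rw [ha]
  -- B's side: runs of the sorted values are the same pairs in ascending value order
  set ssorted := PySem.List.sorted vals (fun v => v) with hss
  have hspw : ssorted.Pairwise (· ≤ ·) := by
    simpa using PySem.List.sorted_pairwise vals (fun v => v)
  have hcnt : ∀ u : Int, ssorted.count u = vals.count u :=
    fun u => (PySem.List.sorted_perm vals (fun v : Int => v) false).count_eq u
  have hruns : calcArrRle ssorted
      = (PySem.Set.ofList ssorted).map (fun v => (v, ((vals.count v : Nat) : Int))) := by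
    rw [calcArr_rle_eq ssorted hspw]
    exact List.map_congr_left (fun u _ => by rw [hcnt u])
  have hsetperm : (PySem.Set.ofList ssorted).Perm (PySem.Set.ofList vals) := by
    rw [List.perm_ext_iff_of_nodup (PySem.Set.nodup_ofList _) (PySem.Set.nodup_ofList _)]
    intro x
    simp only [PySem.Set.mem_ofList]
    exact (PySem.List.sorted_perm vals (fun v : Int => v) false).mem_iff
  have hrunsperm : (calcArrRle ssorted).Perm
      ((PySem.Set.ofList vals).map (fun k => (k, ((vals.count k : Nat) : Int)))) := by
    rw [hruns]
    exact hsetperm.map _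
  have hrunslt : (calcArrRle ssorted).Pairwise (fun a b : Int × Int => a.1 < b.1) := by
    rw [hruns]
    exact List.Pairwise.map _ (fun a b h => h) (calcArr_ofList_lt ssorted hspw)
  -- B's stable sort by count = sorted2 by (count, value); then sorted2 is permutation-invariant here
  have hb : calcArrLineB line
      = (PySem.List.sorted2 (calcArrRle ssorted) (fun t => t.2) (fun t => t.1)).foldl
          (fun acc t => acc ++ [t.1, t.2]) [] := by
    show (PySem.List.sorted (calcArrRle ssorted) (fun r => r.2)).foldl
        (fun acc r => acc ++ [r.1, r.2]) [] = _
    congr 1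
    rw [PySem.List.sorted_eq_foldl_insertBy, calcArr_sorted2_eq_fold]
    exact calcArr_stab_fold (calcArrRle ssorted) []
      (by intro x _ y hy; exact absurd hy (by simp)) hrunslt
  rw [hb]
  congr 1
  exact (calcArr_sorted2_perm_congr _ _ hrunsperm
    (hrunslt.imp (fun h => by omega))).symm

-- A's in-place padding loop is a map over the rows
theorem calcArr_pad_loop (g : List Int → List Int) :
    ∀ (todo done : List (List Int)),
    (PySem.List.pyRange (done.length : Int) ((done.length + todo.length : Nat) : Int)).foldl
      (fun r i => PySem.List.pySetD r i (g (PySem.List.pyGetD r i []))) (done ++ todo)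
    = done ++ todo.map g := by
  intro todo
  induction todo with
  | nil =>
      intro done
      rw [PySem.List.pyRange_one_eq_nil (by simp)]
      simp
  | cons t rest ih =>
      intro done
      rw [PySem.List.pyRange_one_cons (by simp only [List.length_cons]; push_cast; omega)]
      simp only [List.foldl_cons]
      have hget : PySem.List.pyGetD (done ++ t :: rest) ((done.length : Nat) : Int) [] = t := by
        rw [PySem.List.pyGetD_natCast, List.getD_append_right _ _ _ _ le_rfl]
        simp
      have hset : PySem.List.pySetD (done ++ t :: rest) ((done.length : Nat) : Int) (g t)
          = (done ++ [g t]) ++ rest := by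
        rw [PySem.List.pySetD_natCast, List.set_append]
        simp [List.append_assoc]
      rw [hget, hset]
      rw [show ((done.length : Nat) : Int) + 1 = (((done ++ [g t]).length : Nat) : Int) by
        simp only [List.length_append, List.length_cons, List.length_nil]; push_cast; ring]
      rw [show ((done.length + (t :: rest).length : Nat) : Int)
            = (((done ++ [g t]).length + rest.length : Nat) : Int) by
        simp only [List.length_append, List.length_cons, List.length_nil]; push_cast; ring]
      rw [ih (done ++ [g t])]
      simp

theorem calcArr_pad (g : List Int → List Int) (r : List (List Int)) :
    (PySem.List.pyRange 0 (r.length : Int)).foldl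
      (fun r i => PySem.List.pySetD r i (g (PySem.List.pyGetD r i []))) r = r.map g := by
  simpa using calcArr_pad_loop g r []

-- B's max(lengths, default=0) equals A's running maximum started at 0
theorem calcArr_maxD (proc : List (List Int)) :
    PySem.List.maxD (proc.map (fun p => (p.length : Int))) (fun x => x) 0
      = proc.foldl (fun m p => max m ((p.length : Int))) 0 := by
  cases proc with
  | nil => simp [PySem.List.maxD, PySem.List.max?]
  | cons p t =>
      simp only [List.map_cons, PySem.List.maxD, PySem.List.max?_id_cons, Option.getD_some,
        List.foldl_cons, List.foldl_map]
      rw [max_eq_right (Int.natCast_nonneg _)]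

-- writing column entry iN into rows jk..len(di)-1 of the matrix, described row-wise
theorem calcArr_scatter_row (di : List Int) (iN : Nat) :
    ∀ (m jk : Nat) (res : List (List Int)), jk + m = di.length →
    (PySem.List.pyRange ((jk : Nat) : Int) (di.length : Int)).foldl
      (fun res j => PySem.List.pySetD res j
        (PySem.List.pySetD (PySem.List.pyGetD res j []) ((iN : Nat) : Int) (PySem.List.pyGetD di j 0))) res
    = res.mapIdx (fun j row => if jk ≤ j ∧ j < di.length then row.set iN (di.getD j 0) else row) := by
  intro m
  induction m with
  | zero =>
      intro jk res hjk
      rw [PySem.List.pyRange_one_eq_nil (by omega), List.foldl_nil]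
      apply List.ext_getElem (by simp)
      intro j h1 h2
      rw [List.getElem_mapIdx, if_neg (by omega)]
  | succ m ih =>
      intro jk res hjk
      have hlt : jk < di.length := by omega
      rw [PySem.List.pyRange_one_cons (by exact_mod_cast hlt)]
      simp only [List.foldl_cons]
      have hstep : PySem.List.pySetD res ((jk : Nat) : Int)
            (PySem.List.pySetD (PySem.List.pyGetD res ((jk : Nat) : Int) []) ((iN : Nat) : Int)
              (PySem.List.pyGetD di ((jk : Nat) : Int) 0))
          = res.set jk ((res.getD jk []).set iN (di.getD jk 0)) := by
        simp [PySem.List.pyGetD_natCast, PySem.List.pySetD_natCast]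
      rw [hstep]
      rw [show ((jk : Nat) : Int) + 1 = (((jk + 1 : Nat)) : Int) by push_cast; ring]
      rw [ih (jk + 1) _ (by omega)]
      apply List.ext_getElem (by simp)
      intro j hj1 hj2
      have hjr : j < res.length := by simpa using hj2
      simp only [List.getElem_mapIdx, List.getElem_set]
      by_cases hje : jk = j
      · subst hje
        split_ifs <;> first
          | rfl
          | omega
          | simp [List.getD_eq_getElem?_getD, List.getElem?_eq_getElem hjr]
      · simp only [if_neg hje]
        split_ifs <;> first | rfl | omega

-- the whole scatter loop of A's column mode, described entry-wise
theorem calcArr_scatter (data : List (List Int)) :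
    ∀ (m k : Nat) (res : List (List Int)), k + m = data.length →
    (PySem.List.pyRange ((k : Nat) : Int) (data.length : Int)).foldl
      (fun res i =>
        (PySem.List.pyRange 0 ((PySem.List.pyGetD data i []).length : Int)).foldl
          (fun res j => PySem.List.pySetD res j
            (PySem.List.pySetD (PySem.List.pyGetD res j []) i
              (PySem.List.pyGetD (PySem.List.pyGetD data i []) j 0))) res) res
    = res.mapIdx (fun j row => row.mapIdx (fun i x =>
        if k ≤ i ∧ i < data.length ∧ j < (data.getD i []).length then (data.getD i []).getD j 0 else x)) := by
  intro m
  induction m with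
  | zero =>
      intro k res hk
      rw [PySem.List.pyRange_one_eq_nil (by omega), List.foldl_nil]
      apply List.ext_getElem (by simp)
      intro j h1 h2
      rw [List.getElem_mapIdx]
      apply List.ext_getElem (by simp)
      intro i hi1 hi2
      rw [List.getElem_mapIdx, if_neg (by omega)]
  | succ m ih =>
      intro k res hk
      have hlt : k < data.length := by omega
      rw [PySem.List.pyRange_one_cons (by exact_mod_cast hlt)]
      simp only [List.foldl_cons]
      simp only [PySem.List.pyGetD_natCast]
      have hrow := calcArr_scatter_row (data.getD k []) k (data.getD k []).length 0 res (by omega)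
      rw [Nat.cast_zero] at hrow
      simp only [Nat.zero_le, true_and] at hrow
      rw [hrow]
      rw [show ((k : Nat) : Int) + 1 = (((k + 1 : Nat)) : Int) by push_cast; ring]
      rw [ih (k + 1) _ (by omega)]
      apply List.ext_getElem (by simp)
      intro j hj1 hj2
      simp only [List.getElem_mapIdx]
      by_cases hjd : j < (data.getD k []).length
      · rw [if_pos hjd]
        apply List.ext_getElem (by simp)
        intro i hi1 hi2
        by_cases hik : k = i
        · subst hik
          simp only [List.getElem_mapIdx, List.getElem_set]
          split_ifs <;> first | rfl | omega
        · simp only [List.getElem_mapIdx, List.getElem_set, if_neg hik]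
          split_ifs <;> first | rfl | omega
      · rw [if_neg hjd]
        apply List.ext_getElem (by simp)
        intro i hi1 hi2
        simp only [List.getElem_mapIdx]
        by_cases hik : k = i
        · subst hik
          split_ifs <;> first | rfl | omega
        · split_ifs <;> first | rfl | omega

-- row mode: the two programs agree
theorem calcArr_row_eq (array : List (List Int)) (hb : (array.headI).length ≤ array.length) :
    calc_arr array = calc_arr_alt array := by
  have hbi : ((array.headI).length : Int) ≤ (array.length : Int) := by exact_mod_cast hb
  have hft : calcArrLineA = calcArrLineB := funext calcArrLine_eq
  unfold calc_arr calc_arr_alt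
  rw [if_pos (show (array.length : Int) ≥ ((array.headI).length : Int) from hbi)]
  have hdec : decide ((array.length : Int) ≥ ((array.headI).length : Int)) = true := decide_eq_true hbi
  simp only [hdec, if_true]
  rw [hft]
  rw [PySem.List.foldl_prod_mk
      (f := fun m row => max m ((calcArrLineB row).length : Int))
      (g := fun acc row => acc ++ [calcArrLineB row])]
  simp only []
  rw [PySem.List.foldl_append_singleton_eq_map]
  simp only [List.nil_append]
  rw [calcArr_pad (g := fun row => row ++ List.replicate
      ((array.foldl (fun m row => max m ((calcArrLineB row).length : Int)) 0) - (row.length : Int)).toNat 0)]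
  rw [calcArr_maxD, List.foldl_map]

-- column mode: the two programs agree
set_option maxHeartbeats 2000000 in
theorem calcArr_col_eq (array : List (List Int))
    (hb : array.length < (array.headI).length) :
    calc_arr array = calc_arr_alt array := by
  have hbi : ¬ ((array.length : Int) ≥ ((array.headI).length : Int)) := by
    have h : (array.length : Int) < ((array.headI).length : Int) := by exact_mod_cast hb
    omega
  have hft : calcArrLineA = calcArrLineB := funext calcArrLine_eq
  unfold calc_arr calc_arr_alt
  rw [if_neg hbi]
  have hdec : decide ((array.length : Int) ≥ ((array.headI).length : Int)) = false := decide_eq_false hbi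
  simp only [hdec, Bool.false_eq_true, if_false]
  rw [hft]
  rw [PySem.List.pyRange_zero_natCast, List.foldl_map, List.map_map]
  simp only [Function.comp_def, PySem.List.pyGetD_natCast]
  rw [PySem.List.foldl_prod_mk
      (f := fun m j => max m ((calcArrLineB (List.map (fun row => row.getD j 0) array)).length : Int))
      (g := fun acc j => acc ++ [calcArrLineB (List.map (fun row => row.getD j 0) array)])]
  simp only []
  rw [PySem.List.foldl_append_singleton_eq_map]
  simp only [List.nil_append]
  rw [calcArr_maxD]
  simp only [List.foldl_map, List.map_map, Function.comp_def, PySem.List.pyGetD_natCast]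
  set D : List (List Int) :=
    List.map (fun j => calcArrLineB (List.map (fun row => row.getD j 0) array))
      (List.range (array.headI).length) with hD
  set M : Int :=
    List.foldl (fun m j => max m ((calcArrLineB (List.map (fun row => row.getD j 0) array)).length : Int)) 0
      (List.range (array.headI).length) with hM
  have hM0 : (0 : Int) ≤ M := by
    rw [hM]
    exact (PySem.List.le_foldl_max_int (List.range (array.headI).length)
      (fun j => ((calcArrLineB (List.map (fun row => row.getD j 0) array)).length : Int)) 0).1
  have hDi : ∀ i, (hi : i < D.length) →
      D[i] = calcArrLineB (List.map (fun row => row.getD i 0) array) := by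
    intro i hi
    simp [hD]
  conv_rhs => rw [show M = ((M.toNat : Nat) : Int) from (Int.toNat_of_nonneg hM0).symm,
    PySem.List.pyRange_zero_natCast, List.map_map]
  have hsc := calcArr_scatter D D.length 0
    (List.replicate M.toNat (List.replicate (array.headI).length 0)) (by omega)
  rw [Nat.cast_zero] at hsc
  rw [hsc]
  apply List.ext_getElem (by simp [hD])
  intro j hj1 hj2
  simp only [List.getElem_mapIdx, List.getElem_map, List.getElem_range, List.getElem_replicate,
    Function.comp_def]
  apply List.ext_getElem (by simp [hD])
  intro i hi1 hi2
  have hiD : i < D.length := by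
    simp only [hD, List.length_map, List.length_range]
    simpa using hi2
  simp only [List.getElem_mapIdx, List.getElem_replicate, List.getElem_map, List.getElem_range,
    PySem.List.pyGetD_natCast, Nat.cast_lt]
  have hgd : D.getD i [] = calcArrLineB (List.map (fun row => row.getD i 0) array) := by
    rw [List.getD_eq_getElem?_getD, List.getElem?_eq_getElem hiD, Option.getD_some, hDi i hiD]
  rw [hgd]
  by_cases hjl : j < (calcArrLineB (List.map (fun row => row.getD i 0) array)).length
  · rw [if_pos ⟨Nat.zero_le i, hiD, hjl⟩, if_pos hjl]
  · rw [if_neg (fun h => hjl h.2.2), if_neg hjl]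

-- ===== VERDICT (by name: the statement is the Claim_ definition above) =====
theorem calc_arr_spec : Claim_equal_calc_arr := by
  intro array _ _
  unfold Spec_calc_arr
  by_cases hb : (array.headI).length ≤ array.length
  · exact calcArr_row_eq array hb
  · exact calcArr_col_eq array (by omega)
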